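-- pv_equiv track=rewrite | github.com/labbots/NiimPrintX | NiimPrintX/ui/component/FontList.py | parse_font_details
-- ===== SOURCE A (Python) =====
-- def parse_font_details(output):
--     font_details = []
--     font = {}
--     for line in output.splitlines():
--         if line.startswith('  Font:'):
--             if font:
--                 font_details.append(font)
--                 font = {}
--             font['name'] = line.split(':')[1].strip()
--         elif line.startswith('    family:'):
--             font['family'] = line.split(':')[1].strip()
--         elif line.startswith('    style:'):
--             font['style'] = line.split(':')[1].strip()
--         elif line.startswith('    stretch:'):
--             font['stretch'] = line.split(':')[1].strip()
--         elif line.startswith('    weight:'):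
--             font['weight'] = line.split(':')[1].strip()
--         elif line.startswith('    glyphs:'):
--             font['glyphs'] = line.split(':')[1].strip()
--     if font:
--         font_details.append(font)
--     return font_details
-- ===== SOURCE B (Python) =====
-- PREFIX_KEYS = [
--     ('  Font:', 'name'),
--     ('    family:', 'family'),
--     ('    style:', 'style'),
--     ('    stretch:', 'stretch'),
--     ('    weight:', 'weight'),
--     ('    glyphs:', 'glyphs'),
-- ]
--
--
-- def parse_font_details(output):
--     # pass 1: group the lines into blocks, a new block at each '  Font:' marker
--     blocks = []
--     current = []
--     for line in output.splitlines():
--         if line.startswith('  Font:'):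
--             blocks.append(current)
--             current = [line]
--         else:
--             current.append(line)
--     blocks.append(current)
--     # pass 2: parse each block via the prefix table, keep non-empty records
--     result = []
--     for block in blocks:
--         font = {}
--         for line in block:
--             for prefix, key in PREFIX_KEYS:
--                 if line.startswith(prefix):
--                     font[key] = line.split(':')[1].strip()
--                     break
--         if font:
--             result.append(font)
--     return result
-- ===== Notes on version B (the rewrite author's own statement) =====
-- stated objective: alternative
-- what changed: Replaces A's single interleaved loop with mutable flush state by a two-pass pipeline: first group the lines into blocks at each ' Font:' marker (keeping any leading block), then parse each block with a prefix->key table and keep the non-empty records.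
import Mathlib
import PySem

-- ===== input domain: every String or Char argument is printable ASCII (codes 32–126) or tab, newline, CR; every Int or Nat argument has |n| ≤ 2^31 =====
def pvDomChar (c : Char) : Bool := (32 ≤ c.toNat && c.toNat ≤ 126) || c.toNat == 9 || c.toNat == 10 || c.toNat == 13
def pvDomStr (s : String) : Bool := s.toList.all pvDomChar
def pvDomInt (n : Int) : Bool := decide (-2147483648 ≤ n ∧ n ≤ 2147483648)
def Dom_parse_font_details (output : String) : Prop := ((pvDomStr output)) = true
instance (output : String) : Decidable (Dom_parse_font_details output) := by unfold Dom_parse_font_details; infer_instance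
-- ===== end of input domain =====

-- B replaces A's single interleaved loop by a two-pass pipeline (group lines into blocks at each
-- '  Font:' marker, then parse each block with a prefix->key table); alternative decomposition, same cost.


-- ===== PORT A =====
-- line.split(':')[1].strip(); the [1] exists whenever the line matched a prefix containing ':',
-- so the .getD defaults are never taken on any branch that uses this helper (totalising guard only).
def pvVal (line : String) : String :=
  PySem.Str.strip (((PySem.Str.split? line ":").getD []).getD 1 "")

-- A's loop body: state = (font_details so far, current font dict)
def pvStepA (st : List (PySem.Dict String String) × PySem.Dict String String) (line : String) :
    List (PySem.Dict String String) × PySem.Dict String String :=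
  if PySem.Str.startswith line "  Font:" then
    let st' := if st.2.items = [] then st else (st.1 ++ [st.2], PySem.Dict.empty)
    (st'.1, st'.2.insert "name" (pvVal line))
  else if PySem.Str.startswith line "    family:" then (st.1, st.2.insert "family" (pvVal line))
  else if PySem.Str.startswith line "    style:" then (st.1, st.2.insert "style" (pvVal line))
  else if PySem.Str.startswith line "    stretch:" then (st.1, st.2.insert "stretch" (pvVal line))
  else if PySem.Str.startswith line "    weight:" then (st.1, st.2.insert "weight" (pvVal line))
  else if PySem.Str.startswith line "    glyphs:" then (st.1, st.2.insert "glyphs" (pvVal line))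
  else st

def parse_font_details (output : String) : List (List (String × String)) :=
  let st := (PySem.Str.splitlines output).foldl pvStepA ([], PySem.Dict.empty)
  let details := if st.2.items = [] then st.1 else st.1 ++ [st.2]
  details.map (·.items)

-- ===== PORT B =====
def pvPrefixKeys : List (String × String) :=
  [("  Font:", "name"), ("    family:", "family"), ("    style:", "style"),
   ("    stretch:", "stretch"), ("    weight:", "weight"), ("    glyphs:", "glyphs")]

-- B's inner 'for prefix, key in PREFIX_KEYS: … break' loop (first match wins)
def pvParseLineB (font : PySem.Dict String String) (line : String) : PySem.Dict String String :=
  match pvPrefixKeys.find? (fun pk => PySem.Str.startswith line pk.1) with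
  | some pk => font.insert pk.2 (pvVal line)
  | none => font

def pvGroupStep (st : List (List String) × List String) (line : String) :
    List (List String) × List String :=
  if PySem.Str.startswith line "  Font:" then (st.1 ++ [st.2], [line])
  else (st.1, st.2 ++ [line])

def pvParseBlock (block : List String) : PySem.Dict String String :=
  block.foldl pvParseLineB PySem.Dict.empty

def parse_font_details_alt (output : String) : List (List (String × String)) :=
  let g := (PySem.Str.splitlines output).foldl pvGroupStep ([], [])
  let blocks := g.1 ++ [g.2]
  (blocks.foldl
    (fun res b =>
      let font := pvParseBlock b
      if font.items = [] then res else res ++ [font]) []).map (·.items)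

-- ===== PRECONDITION & SPEC =====
def Spec_parse_font_details (output : String) (out : List (List (String × String))) : Prop := out = parse_font_details_alt output
instance (output : String) (out : List (List (String × String))) : Decidable (Spec_parse_font_details output out) := by unfold Spec_parse_font_details; infer_instance

-- ===== CLAIM (what is proved, stated in full; the proofs are below) =====
def Claim_equal_parse_font_details : Prop := ∀ (output : String), Dom_parse_font_details output → Spec_parse_font_details output (parse_font_details output)

-- ===== LEMMAS AND PROOFS =====

-- reference recursion both ports are reduced to
def pvR : List String → PySem.Dict String String → List (PySem.Dict String String)
  | [], f => if f.items = [] then [] else [f]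
  | l :: ls, f =>
    if PySem.Str.startswith l "  Font:" then
      (if f.items = [] then [] else [f]) ++ pvR ls (PySem.Dict.empty.insert "name" (pvVal l))
    else pvR ls (pvParseLineB f l)

-- B's per-line table scan agrees with A's branch chain
lemma pvParseLineB_font (f : PySem.Dict String String) (l : String)
    (h : PySem.Str.startswith l "  Font:" = true) :
    pvParseLineB f l = f.insert "name" (pvVal l) := by
  have h' : PySem.Chars.startswith l.toList [' ', ' ', 'F', 'o', 'n', 't', ':'] = true := h
  simp [pvParseLineB, pvPrefixKeys, h']

lemma pvStepA_nonfont (st : List (PySem.Dict String String) × PySem.Dict String String) (l : String)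
    (h : PySem.Str.startswith l "  Font:" = false) :
    pvStepA st l = (st.1, pvParseLineB st.2 l) := by
  simp only [pvStepA, pvParseLineB, pvPrefixKeys, List.find?, h]
  split_ifs <;> simp_all

-- A's fold equals the reference recursion
lemma pvA_fold (ls : List String) (d : List (PySem.Dict String String))
    (f : PySem.Dict String String) :
    (if (ls.foldl pvStepA (d, f)).2.items = [] then (ls.foldl pvStepA (d, f)).1
     else (ls.foldl pvStepA (d, f)).1 ++ [(ls.foldl pvStepA (d, f)).2]) = d ++ pvR ls f := by
  induction ls generalizing d f with
  | nil => simp [pvR]; split_ifs <;> simp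
  | cons l ls ih =>
    by_cases h : PySem.Str.startswith l "  Font:" = true
    · simp only [List.foldl_cons, pvR, h, if_pos]
      have hstep : pvStepA (d, f) l =
          ((if f.items = [] then d else d ++ [f]),
           PySem.Dict.empty.insert "name" (pvVal l)) := by
        simp only [pvStepA, h, if_pos]
        split_ifs with hf
        · cases f with
          | mk its => simp only at hf; subst hf; rfl
        · rfl
      rw [hstep]
      rw [ih]
      split_ifs <;> simp
    · simp only [List.foldl_cons, pvR, h]
      rw [pvStepA_nonfont _ _ (by simpa using h)]
      rw [ih]
      simp

-- emitting pass over a block list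
def pvEmit (bs : List (List String)) : List (PySem.Dict String String) :=
  bs.foldl (fun res b =>
    let font := pvParseBlock b
    if font.items = [] then res else res ++ [font]) []

lemma pvEmit_generalized (bs : List (List String)) (acc : List (PySem.Dict String String)) :
    bs.foldl (fun res b =>
      let font := pvParseBlock b
      if font.items = [] then res else res ++ [font]) acc = acc ++ pvEmit bs := by
  induction bs generalizing acc with
  | nil => simp [pvEmit]
  | cons b bs ih =>
    simp only [pvEmit, List.foldl_cons]
    rw [ih]
    conv_rhs => rw [ih]
    split_ifs <;> simp

lemma pvEmit_append_singleton (bs : List (List String)) (c : List String) :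
    pvEmit (bs ++ [c]) = pvEmit bs ++
      (if (pvParseBlock c).items = [] then [] else [pvParseBlock c]) := by
  simp only [pvEmit, List.foldl_append, List.foldl_cons, List.foldl_nil]
  rw [pvEmit_generalized]
  split_ifs <;> simp [pvEmit]

lemma pvParseBlock_append (b : List String) (l : String) :
    pvParseBlock (b ++ [l]) = pvParseLineB (pvParseBlock b) l := by
  simp [pvParseBlock]

-- B's grouping fold equals the reference recursion
lemma pvB_fold (ls : List String) (bs : List (List String)) (cur : List String) :
    pvEmit ((ls.foldl pvGroupStep (bs, cur)).1 ++ [(ls.foldl pvGroupStep (bs, cur)).2]) =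
      pvEmit bs ++ pvR ls (pvParseBlock cur) := by
  induction ls generalizing bs cur with
  | nil => simpa [pvR] using pvEmit_append_singleton bs cur
  | cons l ls ih =>
    by_cases h : PySem.Str.startswith l "  Font:" = true
    · have hg : pvGroupStep (bs, cur) l = (bs ++ [cur], [l]) := by
        simp only [pvGroupStep]
        rw [show PySem.Str.startswith l "  Font:" = true from h]
        rfl
      simp only [List.foldl_cons, hg, pvR, h, if_pos]
      rw [ih]
      rw [pvEmit_append_singleton]
      have : pvParseBlock [l] = PySem.Dict.empty.insert "name" (pvVal l) := by
        simp [pvParseBlock, pvParseLineB_font _ _ h]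
      rw [this, List.append_assoc]
    · have hg : pvGroupStep (bs, cur) l = (bs, cur ++ [l]) := by
        simp only [pvGroupStep]
        rw [show PySem.Str.startswith l "  Font:" = false from Bool.of_not_eq_true h]
        rfl
      simp only [List.foldl_cons, hg, pvR, h]
      rw [ih, pvParseBlock_append]
      simp

-- ===== VERDICT (by name: the statement is the Claim_ definition above) =====
theorem parse_font_details_spec : Claim_equal_parse_font_details := by
  intro output _
  show parse_font_details output = parse_font_details_alt output
  have hA := pvA_fold (PySem.Str.splitlines output) [] PySem.Dict.empty
  have hB := pvB_fold (PySem.Str.splitlines output) [] []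
  have ha : parse_font_details output =
      (if ((PySem.Str.splitlines output).foldl pvStepA ([], PySem.Dict.empty)).2.items = []
       then ((PySem.Str.splitlines output).foldl pvStepA ([], PySem.Dict.empty)).1
       else ((PySem.Str.splitlines output).foldl pvStepA ([], PySem.Dict.empty)).1 ++
         [((PySem.Str.splitlines output).foldl pvStepA ([], PySem.Dict.empty)).2]).map (·.items) := rfl
  have hb : parse_font_details_alt output =
      (pvEmit (((PySem.Str.splitlines output).foldl pvGroupStep ([], [])).1 ++
        [((PySem.Str.splitlines output).foldl pvGroupStep ([], [])).2])).map (·.items) := rfl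
  rw [ha, hb, hA, hB]
  rfl
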